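-- pv_equiv track=rewrite | github.com/hgw3lls/gnosis | resolve.py | resolve_conflicts_keep_ours
-- ===== SOURCE A (Python) =====
-- from typing import List, Tuple
--
-- CONFLICT_START = "<<<<<<<"
--
-- CONFLICT_MID = "======="
--
-- CONFLICT_END = ">>>>>>>"
--
-- def resolve_conflicts_keep_ours(lines: List[str]) -> Tuple[List[str], int]:
--     """
--     Returns (new_lines, num_conflict_blocks_resolved).
--
--     Keeps content between <<<<<<< and =======.
--     Drops content between ======= and >>>>>>>.
--     Removes marker lines.
--     """
--     out: List[str] = []
--     i = 0
--     resolved = 0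
--     n = len(lines)
--
--     while i < n:
--         line = lines[i]
--         if line.startswith(CONFLICT_START):
--             # Enter conflict block
--             i += 1
--             ours: List[str] = []
--             theirs: List[str] = []
--
--             # Collect ours until mid
--             while i < n and not lines[i].startswith(CONFLICT_MID):
--                 # If we hit another start unexpectedly, bail out by preserving original
--                 if lines[i].startswith(CONFLICT_START):
--                     raise ValueError("Nested conflict start found before ======= (unexpected).")
--                 ours.append(lines[i])
--                 i += 1
--
--             if i >= n or not lines[i].startswith(CONFLICT_MID):
--                 raise ValueError("Conflict block missing ======= separator.")
--
--             # Skip mid line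
--             i += 1
--
--             # Collect theirs until end
--             while i < n and not lines[i].startswith(CONFLICT_END):
--                 # If we hit another start unexpectedly, bail out
--                 if lines[i].startswith(CONFLICT_START):
--                     raise ValueError("Nested conflict start found inside THEIRS section (unexpected).")
--                 theirs.append(lines[i])
--                 i += 1
--
--             if i >= n or not lines[i].startswith(CONFLICT_END):
--                 raise ValueError("Conflict block missing >>>>>>> end marker.")
--
--             # Skip end line
--             i += 1
--
--             # Keep ours, drop theirs
--             out.extend(ours)
--             resolved += 1
--         else:
--             out.append(line)
--             i += 1
--
--     return out, resolved
-- ===== SOURCE B (Python) =====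
-- def resolve_conflicts_keep_ours(lines):
--     OUTSIDE, OURS, THEIRS = 0, 1, 2
--     out = []
--     ours = []
--     mode = OUTSIDE
--     resolved = 0
--     for line in lines:
--         if mode == OUTSIDE:
--             if line.startswith("<<<<<<<"):
--                 mode = OURS
--                 ours = []
--             else:
--                 out.append(line)
--         elif mode == OURS:
--             if line.startswith("<<<<<<<"):
--                 raise ValueError("Nested conflict start found before ======= (unexpected).")
--             if line.startswith("======="):
--                 mode = THEIRS
--             else:
--                 ours.append(line)
--         else:  # THEIRS
--             if line.startswith("<<<<<<<"):
--                 raise ValueError("Nested conflict start found inside THEIRS section (unexpected).")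
--             if line.startswith(">>>>>>>"):
--                 out.extend(ours)
--                 resolved += 1
--                 mode = OUTSIDE
--             # else: drop theirs line
--     if mode == OURS:
--         raise ValueError("Conflict block missing ======= separator.")
--     if mode == THEIRS:
--         raise ValueError("Conflict block missing >>>>>>> end marker.")
--     return out, resolved
-- ===== Notes on version B (the rewrite author's own statement) =====
-- stated objective: alternative
-- what changed: Replaced the index-based outer while loop with two nested marker-scanning while loops by a single for-loop driven by an explicit OUTSIDE/OURS/THEIRS mode variable and an ours buffer flushed at the end marker.
import Mathlib
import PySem

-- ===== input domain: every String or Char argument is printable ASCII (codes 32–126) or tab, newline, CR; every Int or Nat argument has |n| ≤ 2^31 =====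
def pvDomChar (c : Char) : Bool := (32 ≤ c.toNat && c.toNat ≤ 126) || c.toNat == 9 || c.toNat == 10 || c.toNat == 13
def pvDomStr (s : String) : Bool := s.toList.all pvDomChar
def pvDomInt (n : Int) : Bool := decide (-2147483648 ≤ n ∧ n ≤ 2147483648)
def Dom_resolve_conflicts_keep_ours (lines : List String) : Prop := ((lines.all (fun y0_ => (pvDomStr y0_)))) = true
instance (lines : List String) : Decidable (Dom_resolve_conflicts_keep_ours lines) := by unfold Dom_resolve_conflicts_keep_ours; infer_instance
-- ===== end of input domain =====

-- B replaces A's index-based outer while loop with two nested marker-scanning inner while loops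
-- by a single for-loop over the lines driven by a mode variable (OUTSIDE/OURS/THEIRS) and an ours buffer.
-- A raises ValueError on malformed conflict markers; those inputs are excluded by Pre_ (the ports
-- model a raise as Option.none and default the result).

-- ===== PORT A =====
-- inner while loop "collect ours until =======": returns (ours, rest after the mid line); none = raise
def pvCollectOurs : List String → Option (List String × List String)
  | [] => none  -- loop ended with i >= n: "Conflict block missing ======= separator."
  | l :: rest =>
    if PySem.Str.startswith l "=======" then some ([], rest)
    else if PySem.Str.startswith l "<<<<<<<" then none  -- nested conflict start
    else match pvCollectOurs rest with
      | none => none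
      | some (o, r) => some (l :: o, r)

-- inner while loop "collect theirs until >>>>>>>": returns (theirs, rest after the end line); none = raise
def pvCollectTheirs : List String → Option (List String × List String)
  | [] => none  -- "Conflict block missing >>>>>>> end marker."
  | l :: rest =>
    if PySem.Str.startswith l ">>>>>>>" then some ([], rest)
    else if PySem.Str.startswith l "<<<<<<<" then none  -- nested conflict start
    else match pvCollectTheirs rest with
      | none => none
      | some (t, r) => some (l :: t, r)

theorem pvCollectOurs_length {ls r : List String} {o : List String}
    (h : pvCollectOurs ls = some (o, r)) : r.length < ls.length := by
  induction ls generalizing o r with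
  | nil => simp [pvCollectOurs] at h
  | cons l rest ih =>
    simp only [pvCollectOurs] at h
    split_ifs at h with h1 h2
    · simp only [Option.some.injEq, Prod.mk.injEq] at h
      obtain ⟨-, hr⟩ := h
      subst hr; simp
    · cases hrec : pvCollectOurs rest with
      | none => rw [hrec] at h; simp at h
      | some p =>
        obtain ⟨o', r'⟩ := p
        rw [hrec] at h
        simp only [Option.some.injEq, Prod.mk.injEq] at h
        obtain ⟨-, hr⟩ := h
        have := ih hrec
        subst hr; simp; omega

theorem pvCollectTheirs_length {ls r : List String} {t : List String}
    (h : pvCollectTheirs ls = some (t, r)) : r.length < ls.length := by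
  induction ls generalizing t r with
  | nil => simp [pvCollectTheirs] at h
  | cons l rest ih =>
    simp only [pvCollectTheirs] at h
    split_ifs at h with h1 h2
    · simp only [Option.some.injEq, Prod.mk.injEq] at h
      obtain ⟨-, hr⟩ := h
      subst hr; simp
    · cases hrec : pvCollectTheirs rest with
      | none => rw [hrec] at h; simp at h
      | some p =>
        obtain ⟨t', r'⟩ := p
        rw [hrec] at h
        simp only [Option.some.injEq, Prod.mk.injEq] at h
        obtain ⟨-, hr⟩ := h
        have := ih hrec
        subst hr; simp; omega

-- outer while loop of A (the index i is represented by the remaining suffix of lines)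
def pvLoopA : List String → Option (List String × Int)
  | [] => some ([], 0)
  | l :: rest =>
    if PySem.Str.startswith l "<<<<<<<" then
      match hO : pvCollectOurs rest with
      | none => none
      | some (ours, r1) =>
        match hT : pvCollectTheirs r1 with
        | none => none
        | some (_theirs, r2) =>
          match pvLoopA r2 with
          | none => none
          | some (out', res') => some (ours ++ out', res' + 1)
    else
      match pvLoopA rest with
      | none => none
      | some (out', res') => some (l :: out', res')
termination_by ls => ls.length
decreasing_by
  · have h1 := pvCollectOurs_length hO
    have h2 := pvCollectTheirs_length hT
    simp; omega
  · simp

def resolve_conflicts_keep_ours (lines : List String) : List String × Int :=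
  (pvLoopA lines).getD ([], 0)

-- ===== PORT B =====
-- single pass over the lines with mode (0 = OUTSIDE, 1 = OURS, other = THEIRS), out, ours buffer and counter
def pvLoopB : List String → Nat → List String → List String → Int → Option (List String × Int)
  | [], 0, out, _ours, resolved => some (out, resolved)
  | [], _, _out, _ours, _resolved => none  -- mode OURS: missing =======; mode THEIRS: missing >>>>>>>
  | l :: rest, 0, out, ours, resolved =>
    if PySem.Str.startswith l "<<<<<<<" then pvLoopB rest 1 out [] resolved
    else pvLoopB rest 0 (out ++ [l]) ours resolved
  | l :: rest, 1, out, ours, resolved =>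
    if PySem.Str.startswith l "<<<<<<<" then none  -- nested conflict start before =======
    else if PySem.Str.startswith l "=======" then pvLoopB rest 2 out ours resolved
    else pvLoopB rest 1 out (ours ++ [l]) resolved
  | l :: rest, mode, out, ours, resolved =>
    if PySem.Str.startswith l "<<<<<<<" then none  -- nested conflict start inside THEIRS
    else if PySem.Str.startswith l ">>>>>>>" then pvLoopB rest 0 (out ++ ours) ours (resolved + 1)
    else pvLoopB rest mode out ours resolved  -- drop theirs line

def resolve_conflicts_keep_ours_alt (lines : List String) : List String × Int :=
  (pvLoopB lines 0 [] [] 0).getD ([], 0)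

-- ===== PRECONDITION & SPEC =====
-- Pre_ : well-formed conflict structure — after each <<<<<<< line a ======= line follows, then a
-- >>>>>>> line, with no nested <<<<<<< inside a block, and the input ends outside a block
-- (a small marker DFA over the lines accepts); on its complement Python A raises ValueError,
-- returning no value, so those inputs are excluded.
def pvMarkStep (st : Option Nat) (l : String) : Option Nat :=
  match st with
  | none => none
  | some 0 => if PySem.Str.startswith l "<<<<<<<" then some 1 else some 0
  | some 1 =>
    if PySem.Str.startswith l "<<<<<<<" then none
    else if PySem.Str.startswith l "=======" then some 2 else some 1
  | some _ =>
    if PySem.Str.startswith l "<<<<<<<" then none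
    else if PySem.Str.startswith l ">>>>>>>" then some 0 else some 2

def Pre_resolve_conflicts_keep_ours (lines : List String) : Prop :=
  lines.foldl pvMarkStep (some 0) = some 0
instance (lines : List String) : Decidable (Pre_resolve_conflicts_keep_ours lines) := by
  unfold Pre_resolve_conflicts_keep_ours; infer_instance

def pvWitness_resolve_conflicts_keep_ours : List String :=
  ["a", "<<<<<<< HEAD", "mine", "=======", "theirs", ">>>>>>> other", "b"]

def Spec_resolve_conflicts_keep_ours (lines : List String) (out : List String × Int) : Prop :=
  out = resolve_conflicts_keep_ours_alt lines
instance (lines : List String) (out : List String × Int) : Decidable (Spec_resolve_conflicts_keep_ours lines out) := by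
  unfold Spec_resolve_conflicts_keep_ours; infer_instance

-- ===== CLAIM (what is proved, stated in full; the proofs are below) =====
def Claim_equal_resolve_conflicts_keep_ours : Prop := ∀ (lines : List String), Dom_resolve_conflicts_keep_ours lines → Pre_resolve_conflicts_keep_ours lines → Spec_resolve_conflicts_keep_ours lines (resolve_conflicts_keep_ours lines)

-- ===== LEMMAS AND PROOFS =====

-- two distinct 7-character markers cannot both be prefixes of the same line
theorem pv_excl {p q s : List Char} (hlen : p.length = q.length)
    (hne : p ≠ q) (h : PySem.Chars.startswith s p = true) :
    PySem.Chars.startswith s q = false := by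
  by_contra hq
  rw [Bool.not_eq_false] at hq
  rw [PySem.Chars.startswith_iff] at h hq
  rcases List.prefix_or_prefix_of_prefix h hq with hc | hc
  · exact hne (hc.eq_of_length hlen)
  · exact hne (hc.eq_of_length hlen.symm).symm

-- B in mode OURS behaves like A's first inner while loop
theorem pvLoopB_ours (ls : List String) (out : List String) (res : Int) :
    ∀ ours : List String, pvLoopB ls 1 out ours res =
      match pvCollectOurs ls with
      | none => none
      | some (o, r) => pvLoopB r 2 out (ours ++ o) res := by
  induction ls with
  | nil => intro ours; simp [pvLoopB, pvCollectOurs]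
  | cons l rest ih =>
    intro ours
    by_cases hs : PySem.Str.startswith l "<<<<<<<" = true
    · have hm : ¬ PySem.Str.startswith l "=======" = true := by
        simp only [PySem.Str.startswith_eq] at hs ⊢
        simp [pv_excl (q := ['=','=','=','=','=','=','=']) (by decide) (by decide) hs]
      simp only [pvLoopB, pvCollectOurs, if_pos hs, if_neg hm]
    · by_cases hm : PySem.Str.startswith l "=======" = true
      · simp only [pvLoopB, pvCollectOurs, if_neg hs, if_pos hm]
        simp
      · simp only [pvLoopB, pvCollectOurs, if_neg hs, if_neg hm]
        rw [ih]
        cases hrec : pvCollectOurs rest with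
        | none => rfl
        | some p => obtain ⟨o, r⟩ := p; simp

-- B in mode THEIRS behaves like A's second inner while loop
theorem pvLoopB_theirs (ls : List String) (out ours : List String) (res : Int) :
    pvLoopB ls 2 out ours res =
      match pvCollectTheirs ls with
      | none => none
      | some (_t, r) => pvLoopB r 0 (out ++ ours) ours (res + 1) := by
  induction ls with
  | nil => simp [pvLoopB, pvCollectTheirs]
  | cons l rest ih =>
    by_cases hs : PySem.Str.startswith l "<<<<<<<" = true
    · have he : ¬ PySem.Str.startswith l ">>>>>>>" = true := by
        simp only [PySem.Str.startswith_eq] at hs ⊢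
        simp [pv_excl (q := ['>','>','>','>','>','>','>']) (by decide) (by decide) hs]
      simp only [pvLoopB, pvCollectTheirs, if_pos hs, if_neg he]
    · by_cases he : PySem.Str.startswith l ">>>>>>>" = true
      · simp only [pvLoopB, pvCollectTheirs, if_neg hs, if_pos he]
      · simp only [pvLoopB, pvCollectTheirs, if_neg hs, if_neg he]
        rw [ih]
        cases hrec : pvCollectTheirs rest with
        | none => rfl
        | some p => obtain ⟨t, r⟩ := p; simp

-- B in mode OUTSIDE computes A's whole outer loop (up to the pending out/resolved accumulator)
theorem pvLoopB_outside : ∀ (N : Nat) (ls : List String), ls.length ≤ N →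
    ∀ (out ours : List String) (res : Int),
    pvLoopB ls 0 out ours res = (pvLoopA ls).map (fun p => (out ++ p.1, res + p.2)) := by
  intro N
  induction N with
  | zero =>
    intro ls hlen out ours res
    have : ls = [] := List.eq_nil_of_length_eq_zero (Nat.le_zero.mp hlen)
    subst this; simp [pvLoopB, pvLoopA]
  | succ N ih =>
    intro ls hlen out ours res
    cases ls with
    | nil => simp [pvLoopB, pvLoopA]
    | cons l rest =>
      simp only [List.length_cons, Nat.add_le_add_iff_right] at hlen
      by_cases hs : PySem.Str.startswith l "<<<<<<<" = true
      · simp only [pvLoopB, if_pos hs, pvLoopA]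
        rw [pvLoopB_ours]
        cases hO : pvCollectOurs rest with
        | none => simp
        | some p1 =>
          obtain ⟨o, r1⟩ := p1
          simp only
          rw [pvLoopB_theirs]
          cases hT : pvCollectTheirs r1 with
          | none => simp
          | some p2 =>
            obtain ⟨t, r2⟩ := p2
            simp only
            have hlt1 := pvCollectOurs_length hO
            have hlt2 := pvCollectTheirs_length hT
            rw [ih r2 (by omega)]
            cases hA : pvLoopA r2 with
            | none => simp
            | some p =>
              obtain ⟨out', res'⟩ := p
              simp [List.append_assoc]
              ring
      · simp only [pvLoopB, if_neg hs, pvLoopA]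
        rw [ih rest hlen]
        cases hA : pvLoopA rest with
        | none => simp
        | some p => obtain ⟨out', res'⟩ := p; simp

-- ===== VERDICT (by name: the statement is the Claim_ definition above) =====
theorem resolve_conflicts_keep_ours_spec : Claim_equal_resolve_conflicts_keep_ours := by
  intro lines _ _
  unfold Spec_resolve_conflicts_keep_ours resolve_conflicts_keep_ours resolve_conflicts_keep_ours_alt
  rw [pvLoopB_outside lines.length lines le_rfl]
  cases pvLoopA lines with
  | none => rfl
  | some p => simp
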